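-- pv_equiv track=rewrite | github.com/KirillNN/Python_Codewars | 7kyu/Log without dates.py | check_logs
-- ===== SOURCE A (Python) =====
-- def check_logs(log):
--     if len(log) == 0:
--         return 0
--     if len(log) == 1:
--         return 1
--     count = 1
--     h, m, s = map(int, log[0].split(':'))
--     start = h * 3600 + m * 60 + s
--     for i in log[1:]:
--         h, m, s = map(int, i.split(':'))
--         current_time = h * 3600 + m * 60 + s
--         if current_time <= start:
--             count += 1
--         start = current_time
--     return count
-- ===== SOURCE B (Python) =====
-- def check_logs(log):
--     if len(log) < 2:
--         return len(log)
--     times = [h * 3600 + m * 60 + s for h, m, s in (map(int, e.split(':')) for e in log)]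
--     n = len(times)
--     runs = 0
--     i = 0
--     while i < n:
--         runs += 1
--         i += 1
--         while i < n and times[i] > times[i - 1]:
--             i += 1
--     return runs
-- ===== Notes on version B (the rewrite author's own statement) =====
-- stated objective: alternative
-- what changed: B computes the answer as the number of maximal strictly-increasing runs: after parsing all entries to seconds, a nested while loop skips over each ascending run and counts one per run, instead of A's single pass that threads a running previous time and increments a counter on each non-increasing adjacent pair.
import Mathlib
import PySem

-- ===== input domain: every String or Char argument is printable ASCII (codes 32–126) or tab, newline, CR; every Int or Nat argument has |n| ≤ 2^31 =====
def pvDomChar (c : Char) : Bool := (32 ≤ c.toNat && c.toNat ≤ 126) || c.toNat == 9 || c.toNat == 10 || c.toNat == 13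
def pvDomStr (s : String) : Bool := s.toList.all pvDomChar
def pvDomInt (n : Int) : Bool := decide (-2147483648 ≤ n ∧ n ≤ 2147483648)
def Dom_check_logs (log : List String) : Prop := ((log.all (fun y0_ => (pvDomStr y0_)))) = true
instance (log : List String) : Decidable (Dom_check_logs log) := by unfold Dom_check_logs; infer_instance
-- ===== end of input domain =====

-- B counts maximal strictly-increasing runs with a nested index-skipping loop instead of
-- A's single accumulator pass over adjacent pairs (objective: alternative, same cost).


-- ===== PORT A =====
-- shared parsing helper: `h, m, s = map(int, e.split(':'))` followed by h*3600+m*60+s;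
-- none exactly where Python raises ValueError (wrong arity or non-int part)
def pvTime? (e : String) : Option Int :=
  match PySem.Str.split? e ":" with
  | some [a, b, c] =>
    match PySem.Int.ofStr? a, PySem.Int.ofStr? b, PySem.Int.ofStr? c with
    | some h, some m, some s => some (h * 3600 + m * 60 + s)
    | _, _, _ => none
  | _ => none

-- literal port of A: length tests, parse log[0], thread (count, start) through log[1:]
-- (the `none` branches are unreachable under Pre_: Python raises there)
def check_logs (log : List String) : Int :=
  if log.length = 0 then 0
  else if log.length = 1 then 1
  else
    match pvTime? (log.headD "") with   -- log[0]; log ≠ [] here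
    | none => 0
    | some start =>
      (log.tail.foldl (fun (acc : Int × Int) i =>   -- log[1:]
          match pvTime? i with
          | none => acc
          | some current_time =>
            if current_time ≤ acc.2 then (acc.1 + 1, current_time) else (acc.1, current_time))
        (1, start)).1

-- ===== PORT B =====
-- inner `while i < n and times[i] > times[i-1]: i += 1` of Source B
def skipRun (times : List Int) (n i : Nat) : Nat :=
  if h : i < n ∧ times.getD (i - 1) 0 < times.getD i 0 then skipRun times n (i + 1) else i
termination_by n - i
decreasing_by omega

-- termination helper for the outer loop: the inner loop never moves the index backwards
lemma skipRun_ge (times : List Int) (n : Nat) :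
    ∀ k i, n - i ≤ k → i ≤ skipRun times n i := by
  intro k
  induction k with
  | zero =>
    intro i hi
    rw [skipRun, dif_neg (by omega)]
  | succ k ih =>
    intro i hi
    rw [skipRun]
    split
    · next h => exact le_trans (Nat.le_succ i) (ih (i + 1) (by omega))
    · exact le_rfl

lemma skipRun_ge' (times : List Int) (n i : Nat) : i ≤ skipRun times n i :=
  skipRun_ge times n (n - i) i le_rfl

-- outer `while i < n: runs += 1; i += 1; <inner loop>` of Source B
def countRuns (times : List Int) (n i : Nat) (runs : Int) : Int :=
  if i < n then countRuns times n (skipRun times n (i + 1)) (runs + 1) else runs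
termination_by n - i
decreasing_by have := skipRun_ge' times n (i + 1); omega

-- literal transliteration of Source B: short lists, parse all entries, count maximal
-- strictly-increasing runs with the nested index loop
def check_logs_alt (log : List String) : Int :=
  if log.length < 2 then (log.length : Int)
  else
    let times := log.map (fun e => (pvTime? e).getD 0)   -- getD unreachable under Pre_
    countRuns times times.length 0 0

-- ===== PRECONDITION & SPEC =====
-- Pre_ excludes exactly the inputs where A raises ValueError: the list has ≥ 2 entries
-- and some entry does not split on ':' into exactly three int()-parsable fields.
def Pre_check_logs (log : List String) : Prop :=
  log.length ≤ 1 ∨ (log.all (fun e => (pvTime? e).isSome)) = true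
instance (log : List String) : Decidable (Pre_check_logs log) := by unfold Pre_check_logs; infer_instance
def pvWitness_check_logs : List String := ["10:00:00", "09:59:59", "09:59:59"]

def Spec_check_logs (log : List String) (out : Int) : Prop := out = check_logs_alt log
instance (log : List String) (out : Int) : Decidable (Spec_check_logs log out) := by unfold Spec_check_logs; infer_instance

-- ===== CLAIM (what is proved, stated in full; the proofs are below) =====
def Claim_equal_check_logs : Prop := ∀ (log : List String), Dom_check_logs log → Pre_check_logs log → Spec_check_logs log (check_logs log)

-- ===== LEMMAS AND PROOFS =====

-- proof-side bridge: number of non-increasing adjacent steps, threading the previous value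
def dCount : Int → List Int → Int
  | _, [] => 0
  | prev, x :: xs => (if x ≤ prev then 1 else 0) + dCount x xs

-- A's accumulator loop computes `count` plus the number of non-increasing adjacent steps
lemma foldl_eq_dCount (rest : List String)
    (h : (rest.all (fun e => (pvTime? e).isSome)) = true) :
    ∀ (count start : Int),
      (rest.foldl (fun (acc : Int × Int) i =>
          match pvTime? i with
          | none => acc
          | some current_time =>
            if current_time ≤ acc.2 then (acc.1 + 1, current_time) else (acc.1, current_time))
        (count, start)).1
      = count + dCount start (rest.map (fun e => (pvTime? e).getD 0)) := by
  induction rest with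
  | nil => intro count start; simp [dCount]
  | cons e es ih =>
    intro count start
    simp only [List.all_cons, Bool.and_eq_true] at h
    obtain ⟨he, hes⟩ := h
    obtain ⟨u, hu⟩ := Option.isSome_iff_exists.mp he
    simp only [List.foldl_cons, List.map_cons, hu, Option.getD_some, dCount]
    by_cases hle : u ≤ start
    · simp only [if_pos hle, ih hes (count + 1) u]; ring
    · simp only [if_neg hle, ih hes count u]; ring

-- B's outer loop, entered right after the inner loop from position i ≥ 1, adds the number
-- of non-increasing steps among the not-yet-visited adjacent pairs, plus one per run start
lemma countRuns_skip (times : List Int) :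
    ∀ k i (runs : Int), 1 ≤ i → times.length - i ≤ k →
      countRuns times times.length (skipRun times times.length i) runs
        = runs + dCount (times.getD (i - 1) 0) (times.drop i) := by
  intro k
  induction k with
  | zero =>
    intro i runs h1 hk
    rw [skipRun, dif_neg (by omega), countRuns, if_neg (by omega),
      List.drop_eq_nil_of_le (by omega)]
    simp [dCount]
  | succ k ih =>
    intro i runs h1 hk
    by_cases hin : i < times.length
    · have hdrop : times.drop i = times.getD i 0 :: times.drop (i + 1) := by
        rw [List.getD_eq_getElem _ _ hin, List.drop_eq_getElem_cons hin]
      by_cases hlt : times.getD (i - 1) 0 < times.getD i 0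
      · rw [skipRun, dif_pos ⟨hin, hlt⟩, ih (i + 1) runs (by omega) (by omega), hdrop]
        simp only [dCount, Nat.add_sub_cancel, if_neg (by omega : ¬ times.getD i 0 ≤ times.getD (i - 1) 0)]
        ring
      · rw [skipRun, dif_neg (by tauto), countRuns, if_pos hin,
          ih (i + 1) (runs + 1) (by omega) (by omega), hdrop]
        simp only [dCount, Nat.add_sub_cancel, if_pos (by omega : times.getD i 0 ≤ times.getD (i - 1) 0)]
        ring
    · rw [skipRun, dif_neg (by omega), countRuns, if_neg (by omega),
        List.drop_eq_nil_of_le (by omega)]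
      simp [dCount]

-- ===== VERDICT (by name: the statement is the Claim_ definition above) =====
theorem check_logs_spec : Claim_equal_check_logs := by
  intro log _dom hpre
  unfold Spec_check_logs check_logs check_logs_alt
  match log with
  | [] => simp
  | [x] => simp
  | x :: y :: rs =>
    have hall : ((x :: y :: rs).all (fun e => (pvTime? e).isSome)) = true := by
      unfold Pre_check_logs at hpre
      rcases hpre with h | h
      · simp at h
      · exact h
    have hx : (pvTime? x).isSome = true := by
      simp only [List.all_cons, Bool.and_eq_true] at hall; exact hall.1
    have hrest : ((y :: rs).all (fun e => (pvTime? e).isSome)) = true := by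
      simp only [List.all_cons, Bool.and_eq_true] at hall ⊢; exact hall.2
    obtain ⟨t, ht⟩ := Option.isSome_iff_exists.mp hx
    simp only [List.length_cons, List.headD_cons, List.tail_cons, ht, List.map_cons,
      Option.getD_some]
    rw [if_neg (by omega : ¬ (rs.length + 1 + 1 = 0)),
      if_neg (by omega : ¬ (rs.length + 1 + 1 = 1)),
      if_neg (by omega : ¬ (rs.length + 1 + 1 < 2))]
    have hB := countRuns_skip (t :: (y :: rs).map (fun e => (pvTime? e).getD 0))
      ((y :: rs).length) 1 1 le_rfl (by simp)
    rw [foldl_eq_dCount (y :: rs) hrest 1 t]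
    rw [countRuns, if_pos (by omega)]
    simp only [List.map_cons, List.length_cons, List.length_map, zero_add,
      Nat.sub_self, List.drop_succ_cons, List.drop_zero, List.getD_cons_zero] at hB ⊢
    rw [hB]
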